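-- pv_equiv track=rewrite | github.com/SnakeOilXY/SnakeOil-XY | Doc/BOM/tmp/analyze.py | replaceName
-- ===== SOURCE A (Python) =====
-- def replaceName(inp):
--     nameDict = [
--         {
--             "src":"ISO4762",
--             "dest":"Socket head"
--         },
--         {
--             "src":"ISO7380-1",
--             "dest":"Button head"
--         },
--         {
--             "src":"ISO4026",
--             "dest":"Grub"
--         },
--         {
--             "src":"ISO4032",
--             "dest":"Hex"
--         },
--         {
--             "src":"ISO7092",
--             "dest":"Small size"
--         },
--         {
--             "src":"ISO7093-1",
--             "dest":"Big size"
--         },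
--         {
--             "src":"ISO7089",
--             "dest":"Standard size"
--         },
--         {
--             "src":"ISO7090",
--             "dest":"Standard size"
--         },
--     ]
--
--     for target in nameDict:
--         inp = inp.replace(target["src"],target["dest"])
--
--     return inp
-- ===== SOURCE B (Python) =====
-- def replaceName(inp):
--     mapping = [
--         ("ISO4762", "Socket head"),
--         ("ISO7380-1", "Button head"),
--         ("ISO4026", "Grub"),
--         ("ISO4032", "Hex"),
--         ("ISO7092", "Small size"),
--         ("ISO7093-1", "Big size"),
--         ("ISO7089", "Standard size"),
--         ("ISO7090", "Standard size"),
--     ]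
--     out = []
--     i = 0
--     n = len(inp)
--     while i < n:
--         for src, dest in mapping:
--             if inp.startswith(src, i):
--                 out.append(dest)
--                 i += len(src)
--                 break
--         else:
--             out.append(inp[i])
--             i += 1
--     return "".join(out)
-- ===== Notes on version B (the rewrite author's own statement) =====
-- stated objective: alternative
-- what changed: Replaces eight independent full-string replace passes by a single left-to-right scan that at each position tries the code table once and either substitutes the matching code's name or copies the character, building the output in one pass.
import Mathlib
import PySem

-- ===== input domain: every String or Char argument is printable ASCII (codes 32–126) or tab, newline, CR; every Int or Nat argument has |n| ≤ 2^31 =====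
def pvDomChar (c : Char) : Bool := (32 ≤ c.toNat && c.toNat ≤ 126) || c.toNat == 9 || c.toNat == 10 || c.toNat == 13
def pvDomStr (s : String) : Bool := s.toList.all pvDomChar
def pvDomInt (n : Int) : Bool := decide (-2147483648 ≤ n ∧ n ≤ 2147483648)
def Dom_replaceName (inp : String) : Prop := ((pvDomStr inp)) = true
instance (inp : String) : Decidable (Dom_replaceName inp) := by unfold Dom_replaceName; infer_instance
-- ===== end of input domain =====

-- B replaces A's eight independent full-string replace passes by one left-to-right scan
-- that at each position tries the code table once (alternative single-pass algorithm; return value only).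

-- ===== PORT A =====
def pvNameDict : List (String × String) :=
  [("ISO4762", "Socket head"),
   ("ISO7380-1", "Button head"),
   ("ISO4026", "Grub"),
   ("ISO4032", "Hex"),
   ("ISO7092", "Small size"),
   ("ISO7093-1", "Big size"),
   ("ISO7089", "Standard size"),
   ("ISO7090", "Standard size")]

def replaceName (inp : String) : String :=
  pvNameDict.foldl (fun s t => PySem.Str.replace s t.1 t.2) inp

-- ===== PORT B =====
def pvMapping : List (List Char × List Char) :=
  [("ISO4762".toList, "Socket head".toList),
   ("ISO7380-1".toList, "Button head".toList),
   ("ISO4026".toList, "Grub".toList),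
   ("ISO4032".toList, "Hex".toList),
   ("ISO7092".toList, "Small size".toList),
   ("ISO7093-1".toList, "Big size".toList),
   ("ISO7089".toList, "Standard size".toList),
   ("ISO7090".toList, "Standard size".toList)]

-- the inner for-loop of Source B: first table entry whose source matches at the current position
def pvFindMatch (ps : List (List Char × List Char)) (s : List Char) : Option (List Char × List Char) :=
  ps.find? (fun qe => qe.1.isPrefixOf s)

-- the while-loop of Source B; 'max … 1' is only a totality guard (every source in the table is nonempty)
def pvScan (ps : List (List Char × List Char)) : List Char → List Char
  | [] => []
  | c :: t =>
    match pvFindMatch ps (c :: t) with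
    | some (q, _e) => _e ++ pvScan ps (List.drop (max q.length 1) (c :: t))
    | none => c :: pvScan ps t
termination_by s => s.length
decreasing_by
  · simp only [List.length_drop, List.length_cons]; omega
  · simp only [List.length_cons]; omega

def replaceName_alt (inp : String) : String :=
  String.ofList (pvScan pvMapping inp.toList)

-- ===== PRECONDITION & SPEC =====
def Spec_replaceName (inp : String) (out : String) : Prop := out = replaceName_alt inp
instance (inp : String) (out : String) : Decidable (Spec_replaceName inp out) := by unfold Spec_replaceName; infer_instance

-- ===== CLAIM (what is proved, stated in full; the proofs are below) =====
def Claim_equal_replaceName : Prop := ∀ (inp : String), Dom_replaceName inp → Spec_replaceName inp (replaceName inp)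

-- ===== LEMMAS AND PROOFS =====

-- structural (fuel-free) form of Python str.replace; 'max … 1' is only a totality guard,
-- all lemmas below use it with a nonempty pattern
def pvRep (old new : List Char) : List Char → List Char
  | [] => []
  | c :: t =>
    if old.isPrefixOf (c :: t) then new ++ pvRep old new (List.drop (max old.length 1) (c :: t))
    else c :: pvRep old new t
termination_by s => s.length
decreasing_by
  · simp only [List.length_drop, List.length_cons]; omega
  · simp only [List.length_cons]; omega

theorem pvGo_eq_rep (old new : List Char) (h : old ≠ []) :
    ∀ (fuel : Nat) (l acc : List Char), l.length ≤ fuel →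
      PySem.Chars.replace.go old new fuel l acc = acc.reverse ++ pvRep old new l := by
  have hmax : max old.length 1 = old.length := by
    have := List.length_pos_of_ne_nil h
    omega
  intro fuel
  induction fuel with
  | zero =>
    intro l acc hl
    have hnil : l = [] := List.length_eq_zero_iff.mp (Nat.le_zero.mp hl)
    subst hnil
    simp [PySem.Chars.replace.go, pvRep]
  | succ n ih =>
    intro l acc hl
    cases l with
    | nil => simp [PySem.Chars.replace.go, pvRep]
    | cons c t =>
      rw [PySem.Chars.replace.go]
      by_cases hpre : old.isPrefixOf (c :: t)
      · have ho : 0 < old.length := List.length_pos_of_ne_nil h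
        rw [if_pos hpre, ih _ _ (by simp at hl ⊢; omega)]
        rw [pvRep, if_pos hpre, hmax]
        simp
      · rw [if_neg hpre, ih _ _ (by simp at hl ⊢; omega)]
        rw [pvRep, if_neg hpre]
        simp

theorem pvReplace_eq_rep (s old new : List Char) (h : old ≠ []) :
    PySem.Chars.replace s old new = pvRep old new s := by
  unfold PySem.Chars.replace
  rw [if_neg (by simp [List.isEmpty_iff, h])]
  rw [pvGo_eq_rep old new h s.length s [] (le_refl _)]
  simp

theorem pvPrefix_append_cases (u e X : List Char) (hu : u <+: e ++ X) : u <+: e ∨ e <+: u := by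
  rcases Nat.le_total u.length e.length with hle | hle
  · exact Or.inl (List.prefix_of_prefix_length_le hu (List.prefix_append e X) hle)
  · exact Or.inr (List.prefix_of_prefix_length_le (List.prefix_append e X) hu hle)

theorem pvFindMatch_mem {ps : List (List Char × List Char)} {s : List Char} {qe : List Char × List Char}
    (h : pvFindMatch ps s = some qe) : qe ∈ ps ∧ qe.1 <+: s := by
  refine ⟨List.mem_of_find?_eq_some h, ?_⟩
  have := List.find?_some h
  exact List.isPrefixOf_iff_prefix.mp this

theorem pvFindMatch_none_of_head {ps : List (List Char × List Char)} {c : Char} {l : List Char}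
    (hq : ∀ qe ∈ ps, qe.1.head? = some 'I') (hc : c ≠ 'I') : pvFindMatch ps (c :: l) = none := by
  apply List.find?_eq_none.mpr
  intro qe hmem hpre
  have hpfx := List.isPrefixOf_iff_prefix.mp hpre
  have hhead := hq qe hmem
  cases hqe : qe.1 with
  | nil => simp [hqe] at hhead
  | cons a q' =>
    rw [hqe] at hpfx hhead
    simp at hhead
    rw [List.cons_prefix_cons] at hpfx
    exact hc (hpfx.1 ▸ hhead.symm ▸ rfl)

theorem pvScan_copy (ps : List (List Char × List Char))
    (hq : ∀ qe ∈ ps, qe.1.head? = some 'I') :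
    ∀ (u X : List Char), (∀ c ∈ u, c ≠ 'I') → pvScan ps (u ++ X) = u ++ pvScan ps X := by
  intro u
  induction u with
  | nil => simp
  | cons c u' ih =>
    intro X hu
    have hc : c ≠ 'I' := hu c (by simp)
    rw [List.cons_append, pvScan, pvFindMatch_none_of_head hq hc]
    simp only []
    rw [ih X (fun x hx => hu x (by simp [hx]))]
    rfl

theorem pvRep_copy (old new : List Char) (hI : old.head? = some 'I') :
    ∀ (e X : List Char), 'I' ∉ e → pvRep old new (e ++ X) = e ++ pvRep old new X := by
  intro e
  induction e with
  | nil => simp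
  | cons c e' ih =>
    intro X he
    have hc : c ≠ 'I' := by intro hcI; exact he (by simp [hcI])
    rw [List.cons_append, pvRep, if_neg]
    · rw [ih X (fun hx => he (by simp [hx]))]
      rfl
    · intro hpre
      have hpfx := List.isPrefixOf_iff_prefix.mp hpre
      obtain ⟨a, o', hold⟩ : ∃ a o', old = a :: o' := by
        cases old with
        | nil => simp at hI
        | cons a o' => exact ⟨a, o', rfl⟩
      rw [hold] at hpfx hI
      simp at hI
      rw [List.cons_prefix_cons] at hpfx
      exact hc (hpfx.1 ▸ hI ▸ rfl)

theorem pvRep_head (old new : List Char) (h : old ≠ []) (Y : List Char) :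
    pvRep old new (old ++ Y) = new ++ pvRep old new Y := by
  obtain ⟨a, o', hold⟩ : ∃ a o', old = a :: o' := by
    cases old with
    | nil => exact absurd rfl h
    | cons a o' => exact ⟨a, o', rfl⟩
  have hmax : max old.length 1 = old.length := by
    have := List.length_pos_of_ne_nil h
    omega
  rw [hold, List.cons_append, pvRep, if_pos, ← List.cons_append, ← hold, hmax, List.drop_left]
  rw [← List.cons_append, ← hold]
  exact List.isPrefixOf_iff_prefix.mpr (List.prefix_append old Y)

-- a proper suffix of the new pattern found as a prefix of the scan output was already there in the input
theorem pvSuffix_reflect (p : List Char) (ps : List (List Char × List Char))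
    (hsuf : ∀ qe ∈ ps, ∀ j, 1 ≤ j → j < p.length → ¬ (p.drop j <+: qe.2) ∧ ¬ (qe.2 <+: p.drop j)) :
    ∀ (n : Nat) (s : List Char), s.length ≤ n → ∀ j, 1 ≤ j → j < p.length →
      p.drop j <+: pvScan ps s → p.drop j <+: s := by
  intro n
  induction n with
  | zero =>
    intro s hs j h1 hj hpre
    have hnil : s = [] := List.length_eq_zero_iff.mp (Nat.le_zero.mp hs)
    subst hnil
    rw [pvScan] at hpre
    have : p.drop j = [] := List.prefix_nil.mp hpre
    have := congrArg List.length this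
    simp at this
    omega
  | succ n ih =>
    intro s hs j h1 hj hpre
    cases s with
    | nil =>
      rw [pvScan] at hpre
      have : p.drop j = [] := List.prefix_nil.mp hpre
      have := congrArg List.length this
      simp at this
      omega
    | cons c t =>
      cases hfm : pvFindMatch ps (c :: t) with
      | some qe =>
        rw [pvScan, hfm] at hpre
        rcases pvPrefix_append_cases _ _ _ hpre with hcase | hcase
        · exact absurd hcase ((hsuf qe (pvFindMatch_mem hfm).1 j h1 hj).1)
        · exact absurd hcase ((hsuf qe (pvFindMatch_mem hfm).1 j h1 hj).2)
      | none =>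
        rw [pvScan, hfm] at hpre
        rw [List.drop_eq_getElem_cons hj] at hpre ⊢
        rw [List.cons_prefix_cons] at hpre
        obtain ⟨hc, hrest⟩ := hpre
        rw [List.cons_prefix_cons]
        refine ⟨hc, ?_⟩
        by_cases hjlt : j + 1 < p.length
        · exact ih t (by simp at hs; omega) (j + 1) (by omega) hjlt hrest
        · have : p.drop (j + 1) = [] := List.drop_eq_nil_of_le (by omega)
          rw [this]
          exact List.nil_prefix

-- key commuting step: one more sequential replace equals the scan with the pattern appended
theorem pvStep (p d : List Char) (ps : List (List Char × List Char))
    (hp0 : p ≠ [])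
    (hpI : p.head? = some 'I')
    (hpT : ∀ c ∈ p.tail, c ≠ 'I')
    (hq : ∀ qe ∈ ps, qe.1.head? = some 'I')
    (he : ∀ qe ∈ ps, 'I' ∉ qe.2)
    (hsuf : ∀ qe ∈ ps, ∀ j, 1 ≤ j → j < p.length → ¬ (p.drop j <+: qe.2) ∧ ¬ (qe.2 <+: p.drop j)) :
    ∀ (n : Nat) (s : List Char), s.length ≤ n →
      pvRep p d (pvScan ps s) = pvScan (ps ++ [(p, d)]) s := by
  have hmax : max p.length 1 = p.length := by
    have := List.length_pos_of_ne_nil hp0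
    omega
  intro n
  induction n with
  | zero =>
    intro s hs
    have hnil : s = [] := List.length_eq_zero_iff.mp (Nat.le_zero.mp hs)
    subst hnil
    rw [pvScan, pvScan, pvRep]
  | succ n ih =>
    intro s hs
    cases s with
    | nil => rw [pvScan, pvScan, pvRep]
    | cons c t =>
      cases hfm : pvFindMatch ps (c :: t) with
      | some qe =>
        have hfm' : pvFindMatch (ps ++ [(p, d)]) (c :: t) = some qe := by
          unfold pvFindMatch at hfm ⊢
          rw [List.find?_append, hfm]
          rfl
        rw [pvScan, hfm, pvScan, hfm']
        obtain ⟨q, e⟩ := qe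
        simp only []
        rw [pvRep_copy p d hpI e _ (he (q, e) (pvFindMatch_mem hfm).1)]
        congr 1
        exact ih _ (by simp at hs ⊢; omega)
      | none =>
        obtain ⟨a, pt, hpcons⟩ : ∃ a pt, p = a :: pt := by
          cases p with
          | nil => exact absurd rfl hp0
          | cons a pt => exact ⟨a, pt, rfl⟩
        have haI : a = 'I' := by rw [hpcons] at hpI; simpa using hpI
        by_cases hpm : p.isPrefixOf (c :: t)
        · -- the new pattern matches at the head
          have hpfx : p <+: c :: t := List.isPrefixOf_iff_prefix.mp hpm
          obtain ⟨rest, hrest⟩ := hpfx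
          have hfm' : pvFindMatch (ps ++ [(p, d)]) (c :: t) = some (p, d) := by
            unfold pvFindMatch at hfm ⊢
            rw [List.find?_append, hfm]
            simp [hpm]
          have hRHS : pvScan (ps ++ [(p, d)]) (c :: t) = d ++ pvScan (ps ++ [(p, d)]) rest := by
            rw [pvScan, hfm']
            simp only []
            rw [hmax, ← hrest, List.drop_left]
          rw [hRHS]
          rw [hpcons, List.cons_append] at hrest
          injection hrest with hc ht
          rw [pvScan, hfm]
          simp only []
          rw [← ht, pvScan_copy ps hq pt rest (by rw [hpcons] at hpT; simpa using hpT)]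
          have hform : c :: (pt ++ pvScan ps rest) = p ++ pvScan ps rest := by
            rw [hpcons, hc, List.cons_append]
          rw [hform, pvRep_head p d hp0]
          congr 1
          apply ih
          have hlt : rest.length ≤ t.length := by
            have := congrArg List.length ht
            simp at this
            omega
          simp at hs
          omega
        · -- no pattern matches at the head
          have hfm' : pvFindMatch (ps ++ [(p, d)]) (c :: t) = none := by
            unfold pvFindMatch at hfm ⊢
            rw [List.find?_append, hfm]
            simp [hpm]
          rw [pvScan, hfm, pvScan, hfm']
          simp only []
          rw [pvRep, if_neg]
          · rw [ih t (by simp at hs; omega)]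
          · intro hpre
            have hpfx := List.isPrefixOf_iff_prefix.mp hpre
            rw [hpcons, List.cons_prefix_cons] at hpfx
            obtain ⟨hca, hptpre⟩ := hpfx
            cases hpt : pt with
            | nil =>
              apply hpm
              apply List.isPrefixOf_iff_prefix.mpr
              rw [hpcons, hpt, List.cons_prefix_cons]
              exact ⟨hca, List.nil_prefix⟩
            | cons b pt' =>
              have hlen : 1 < p.length := by rw [hpcons, hpt]; simp
              have hdrop1 : p.drop 1 = pt := by rw [hpcons]; rfl
              have hscan : p.drop 1 <+: pvScan ps t := by
                rw [hdrop1, hpt]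
                rw [hpt] at hptpre
                exact hptpre
              have hint := pvSuffix_reflect p ps hsuf t.length t (le_refl _) 1 (le_refl _) hlen hscan
              apply hpm
              apply List.isPrefixOf_iff_prefix.mpr
              rw [hpcons, List.cons_prefix_cons]
              exact ⟨hca, by rw [← hdrop1]; exact hint⟩

theorem pvScan_nil_ps : ∀ s : List Char, pvScan [] s = s := by
  intro s
  induction s with
  | nil => rw [pvScan]
  | cons c t ih =>
    rw [pvScan]
    have : pvFindMatch [] (c :: t) = none := rfl
    rw [this, ih]

set_option maxRecDepth 10000 in
set_option maxHeartbeats 2000000 in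
theorem pvKey (l : List Char) :
    PySem.Chars.replace (PySem.Chars.replace (PySem.Chars.replace (PySem.Chars.replace
      (PySem.Chars.replace (PySem.Chars.replace (PySem.Chars.replace (PySem.Chars.replace l
        "ISO4762".toList "Socket head".toList)
        "ISO7380-1".toList "Button head".toList)
        "ISO4026".toList "Grub".toList)
        "ISO4032".toList "Hex".toList)
        "ISO7092".toList "Small size".toList)
        "ISO7093-1".toList "Big size".toList)
        "ISO7089".toList "Standard size".toList)
        "ISO7090".toList "Standard size".toList
      = pvScan pvMapping l := by
  rw [pvReplace_eq_rep _ "ISO4762".toList "Socket head".toList (by simp)]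
  rw [pvReplace_eq_rep _ "ISO7380-1".toList "Button head".toList (by simp)]
  rw [pvReplace_eq_rep _ "ISO4026".toList "Grub".toList (by simp)]
  rw [pvReplace_eq_rep _ "ISO4032".toList "Hex".toList (by simp)]
  rw [pvReplace_eq_rep _ "ISO7092".toList "Small size".toList (by simp)]
  rw [pvReplace_eq_rep _ "ISO7093-1".toList "Big size".toList (by simp)]
  rw [pvReplace_eq_rep _ "ISO7089".toList "Standard size".toList (by simp)]
  rw [pvReplace_eq_rep _ "ISO7090".toList "Standard size".toList (by simp)]
  conv_lhs => rw [← pvScan_nil_ps l]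
  rw [pvStep "ISO4762".toList "Socket head".toList [] (by simp) (by simp) (by simp) (by simp) (by simp) (of_decide_eq_true (by rfl)) l.length l (le_refl _)]
  simp only [List.nil_append]
  rw [pvStep "ISO7380-1".toList "Button head".toList [("ISO4762".toList, "Socket head".toList)] (by simp) (by simp) (by simp) (by simp) (by simp) (of_decide_eq_true (by rfl)) l.length l (le_refl _)]
  simp only [List.cons_append, List.nil_append]
  rw [pvStep "ISO4026".toList "Grub".toList [("ISO4762".toList, "Socket head".toList), ("ISO7380-1".toList, "Button head".toList)] (by simp) (by simp) (by simp) (by simp) (by simp) (of_decide_eq_true (by rfl)) l.length l (le_refl _)]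
  simp only [List.cons_append, List.nil_append]
  rw [pvStep "ISO4032".toList "Hex".toList [("ISO4762".toList, "Socket head".toList), ("ISO7380-1".toList, "Button head".toList), ("ISO4026".toList, "Grub".toList)] (by simp) (by simp) (by simp) (by simp) (by simp) (of_decide_eq_true (by rfl)) l.length l (le_refl _)]
  simp only [List.cons_append, List.nil_append]
  rw [pvStep "ISO7092".toList "Small size".toList [("ISO4762".toList, "Socket head".toList), ("ISO7380-1".toList, "Button head".toList), ("ISO4026".toList, "Grub".toList), ("ISO4032".toList, "Hex".toList)] (by simp) (by simp) (by simp) (by simp) (by simp) (of_decide_eq_true (by rfl)) l.length l (le_refl _)]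
  simp only [List.cons_append, List.nil_append]
  rw [pvStep "ISO7093-1".toList "Big size".toList [("ISO4762".toList, "Socket head".toList), ("ISO7380-1".toList, "Button head".toList), ("ISO4026".toList, "Grub".toList), ("ISO4032".toList, "Hex".toList), ("ISO7092".toList, "Small size".toList)] (by simp) (by simp) (by simp) (by simp) (by simp) (of_decide_eq_true (by rfl)) l.length l (le_refl _)]
  simp only [List.cons_append, List.nil_append]
  rw [pvStep "ISO7089".toList "Standard size".toList [("ISO4762".toList, "Socket head".toList), ("ISO7380-1".toList, "Button head".toList), ("ISO4026".toList, "Grub".toList), ("ISO4032".toList, "Hex".toList), ("ISO7092".toList, "Small size".toList), ("ISO7093-1".toList, "Big size".toList)] (by simp) (by simp) (by simp) (by simp) (by simp) (of_decide_eq_true (by rfl)) l.length l (le_refl _)]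
  simp only [List.cons_append, List.nil_append]
  rw [pvStep "ISO7090".toList "Standard size".toList [("ISO4762".toList, "Socket head".toList), ("ISO7380-1".toList, "Button head".toList), ("ISO4026".toList, "Grub".toList), ("ISO4032".toList, "Hex".toList), ("ISO7092".toList, "Small size".toList), ("ISO7093-1".toList, "Big size".toList), ("ISO7089".toList, "Standard size".toList)] (by simp) (by simp) (by simp) (by simp) (by simp) (of_decide_eq_true (by rfl)) l.length l (le_refl _)]
  simp only [List.cons_append, List.nil_append]
  rfl

-- ===== VERDICT (by name: the statement is the Claim_ definition above) =====
set_option maxRecDepth 10000 in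
set_option maxHeartbeats 2000000 in
theorem replaceName_spec : Claim_equal_replaceName := by
  intro inp _
  unfold Spec_replaceName replaceName replaceName_alt pvNameDict
  simp only [List.foldl_cons, List.foldl_nil]
  simp only [PySem.Str.replace, String.toList_ofList]
  exact congrArg String.ofList (pvKey inp.toList)
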